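-- pv_equiv track=rewrite | github.com/Sionparadox/Algorithm | 프로그래머스/3/12938. 최고의 집합/최고의 집합.py | solution
-- ===== SOURCE A (Python) =====
-- def solution(n, s):
--     if s < n:
--         return [-1]
--     answer = []
--     for i in range(n, 0, -1):
--         val = s//i
--         answer.append(val)
--         s -= val
--
--     return answer
-- ===== SOURCE B (Python) =====
-- def solution(n, s):
--     if s < n:
--         return [-1]
--     if n <= 0:
--         return []
--     q, r = divmod(s, n)
--     return [q] * (n - r) + [q + 1] * r
-- ===== Notes on version B (the rewrite author's own statement) =====
-- stated objective: simpler
-- what changed: Replaced A's n-step subtract-and-divide loop with the closed-form distribution [q]*(n-r) + [q+1]*r from a single divmod(s, n) (guarding n <= 0, where A's empty loop yields []).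
import Mathlib
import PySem

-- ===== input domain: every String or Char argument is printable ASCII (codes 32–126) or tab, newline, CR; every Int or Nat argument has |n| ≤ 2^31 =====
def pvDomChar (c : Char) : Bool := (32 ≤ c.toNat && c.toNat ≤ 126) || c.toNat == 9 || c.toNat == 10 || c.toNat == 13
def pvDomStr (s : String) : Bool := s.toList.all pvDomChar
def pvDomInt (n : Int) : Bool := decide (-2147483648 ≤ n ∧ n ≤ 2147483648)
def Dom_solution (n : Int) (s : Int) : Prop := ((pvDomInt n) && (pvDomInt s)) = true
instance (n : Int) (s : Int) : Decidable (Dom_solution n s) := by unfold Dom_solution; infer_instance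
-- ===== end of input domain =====

-- B replaces A's subtract-and-divide loop by the closed form [q]*(n-r) ++ [q+1]*r with (q,r) = divmod(s,n); simpler.

-- ===== PORT A =====
def solution (n : Int) (s : Int) : List Int :=
  if s < n then [-1]
  else
    -- for i in range(n, 0, -1): val = s//i; answer.append(val); s -= val
    ((PySem.List.pyRange n 0 (-1)).foldl
      (fun (st : List Int × Int) i =>
        let val := PySem.Int.floordiv st.2 i
        (st.1 ++ [val], st.2 - val)) ([], s)).1

-- ===== PORT B =====
def solution_alt (n : Int) (s : Int) : List Int :=
  if s < n then [-1]
  else if n ≤ 0 then []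
  else
    let q := PySem.Int.floordiv s n
    let r := PySem.Int.mod s n
    List.replicate (n - r).toNat q ++ List.replicate r.toNat (q + 1)

-- ===== PRECONDITION & SPEC =====
def Spec_solution (n : Int) (s : Int) (out : List Int) : Prop := out = solution_alt n s
instance (n : Int) (s : Int) (out : List Int) : Decidable (Spec_solution n s out) := by unfold Spec_solution; infer_instance

-- ===== CLAIM (what is proved, stated in full; the proofs are below) =====
def Claim_equal_solution : Prop := ∀ (n : Int) (s : Int), Dom_solution n s → Spec_solution n s (solution n s)

-- ===== LEMMAS AND PROOFS =====

-- Loop invariant: folding A's body over range(k, 0, -1) starting from s = k*q + r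
-- with 0 ≤ r < k appends (k - r) copies of q followed by r copies of q + 1.
theorem solution_loop_eq (k : Nat) :
    ∀ (acc : List Int) (q r : Int), 0 ≤ r → r < (k : Int) →
      ((PySem.List.pyRange (k : Int) 0 (-1)).foldl
        (fun (st : List Int × Int) i =>
          (st.1 ++ [PySem.Int.floordiv st.2 i], st.2 - PySem.Int.floordiv st.2 i))
        (acc, (k : Int) * q + r)).1
      = acc ++ List.replicate ((k : Int) - r).toNat q ++ List.replicate r.toNat (q + 1) := by
  induction k with
  | zero =>
    intro acc q r h0 hk
    exact absurd hk (by simp; omega)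
  | succ k ih =>
    intro acc q r h0 hk
    have hk1 : ((k + 1 : Nat) : Int) = (k : Int) + 1 := by push_cast; ring
    rw [hk1] at hk ⊢
    have hpos : (0 : Int) < (k : Int) + 1 := by positivity
    rw [PySem.List.pyRange_neg_one_cons (by omega)]
    have hdiv : PySem.Int.floordiv (((k : Int) + 1) * q + r) ((k : Int) + 1) = q := by
      rw [PySem.Int.floordiv_eq_iff_of_pos hpos]
      constructor <;> nlinarith
    simp only [List.foldl_cons, hdiv]
    have hm : (k : Int) + 1 - 1 = (k : Int) := by ring
    have hs : ((k : Int) + 1) * q + r - q = (k : Int) * q + r := by ring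
    rw [hm, hs]
    by_cases hrk : r < (k : Int)
    · rw [ih (acc ++ [q]) q r h0 hrk]
      have h1 : ((k : Int) + 1 - r).toNat = ((k : Int) - r).toNat + 1 := by omega
      rw [h1, List.replicate_succ]
      simp
    · -- here r = k
      have hrk' : r = (k : Int) := by omega
      rcases Nat.eq_zero_or_pos k with hk0 | hk0
      · subst hk0
        have hr0 : r = 0 := by simpa using hrk'
        subst hr0
        rw [show ((0 : Nat) : Int) = 0 from rfl, PySem.List.pyRange_neg_one_eq_nil le_rfl]
        norm_num
      · have hsplit : (k : Int) * q + r = (k : Int) * (q + 1) + 0 := by rw [hrk']; ring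
        rw [hsplit, ih (acc ++ [q]) (q + 1) 0 le_rfl (by exact_mod_cast hk0)]
        have h1 : ((k : Int) + 1 - r).toNat = 1 := by omega
        have h2 : ((k : Int) - 0).toNat = r.toNat := by omega
        rw [h1, h2]
        simp

-- ===== VERDICT (by name: the statement is the Claim_ definition above) =====
theorem solution_spec : Claim_equal_solution := by
  intro n s _
  unfold Spec_solution solution solution_alt
  by_cases hsn : s < n
  · simp [hsn]
  · simp only [if_neg hsn]
    by_cases hn0 : n ≤ 0
    · rw [PySem.List.pyRange_neg_one_eq_nil hn0]
      simp [hn0]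
    · simp only [if_neg hn0]
      have hnpos : (0 : Int) < n := by omega
      set q := PySem.Int.floordiv s n with hq
      set r := PySem.Int.mod s n with hr
      have hsum : q * n + r = s := PySem.Int.floordiv_mul_add_mod s n
      have hre : r = s % n := by rw [hr]; exact PySem.Int.mod_eq_emod_of_pos hnpos
      have hr0 : 0 ≤ r := by rw [hre]; exact Int.emod_nonneg s (by omega)
      have hrn : r < n := by rw [hre]; exact Int.emod_lt_of_pos s hnpos
      have hs2 : s = n * q + r := by rw [← hsum]; ring
      have hncast : ((n.toNat : Nat) : Int) = n := Int.toNat_of_nonneg (by omega)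
      have hfold := solution_loop_eq n.toNat [] q r hr0 (by rw [hncast]; exact hrn)
      rw [hncast] at hfold
      rw [hs2, hfold]
      simp
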